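-- pv_equiv track=rewrite | github.com/toanhac/YoutubeSentimentAnalysis | train.py | convert_to_3_class
-- ===== SOURCE A (Python) =====
-- positive = [1, 2, 3, 4, 5, 6, 7, 9, 10, 13, 16, 20, 21, 22, 23]
--
-- negative = [8, 11, 12, 14, 15, 17, 18, 19, 24, 25, 26]
--
-- def convert_to_3_class(row):
--     labels = row["labels"]
--     if any(lab in positive for lab in labels):
--         return 2  # positive
--     elif any(lab in negative for lab in labels):
--         return 0  # negative
--     else:
--         return 1  # neutral
-- ===== SOURCE B (Python) =====
-- positive = [1, 2, 3, 4, 5, 6, 7, 9, 10, 13, 16, 20, 21, 22, 23]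
--
-- negative = [8, 11, 12, 14, 15, 17, 18, 19, 24, 25, 26]
--
-- def convert_to_3_class(row):
--     saw_negative = False
--     for lab in row["labels"]:
--         if lab in positive:
--             return 2  # positive wins immediately
--         if lab in negative:
--             saw_negative = True
--     return 0 if saw_negative else 1
-- ===== Notes on version B (the rewrite author's own statement) =====
-- stated objective: alternative
-- what changed: Replaces A's two sequential any(...) scans over the labels with a single pass that returns 2 on the first positive label and maintains a saw_negative flag, deciding 0 vs 1 after the loop.
import Mathlib
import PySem

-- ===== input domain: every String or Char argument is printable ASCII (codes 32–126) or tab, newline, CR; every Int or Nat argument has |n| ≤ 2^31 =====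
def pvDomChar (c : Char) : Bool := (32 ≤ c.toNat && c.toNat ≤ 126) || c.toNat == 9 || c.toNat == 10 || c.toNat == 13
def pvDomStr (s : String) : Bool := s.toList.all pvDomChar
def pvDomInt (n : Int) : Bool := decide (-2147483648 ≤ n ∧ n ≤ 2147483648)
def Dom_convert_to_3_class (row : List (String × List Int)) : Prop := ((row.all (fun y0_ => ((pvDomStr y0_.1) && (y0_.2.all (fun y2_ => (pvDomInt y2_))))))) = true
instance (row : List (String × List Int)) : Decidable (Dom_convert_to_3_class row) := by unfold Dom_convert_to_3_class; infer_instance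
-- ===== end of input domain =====

-- B replaces A's two sequential any(...) scans with one pass keeping a saw_negative flag (alternative decomposition, same cost).

-- module-level constants, shared verbatim by both Pythons
def positiveL : List Int := [1, 2, 3, 4, 5, 6, 7, 9, 10, 13, 16, 20, 21, 22, 23]
def negativeL : List Int := [8, 11, 12, 14, 15, 17, 18, 19, 24, 25, 26]

-- ===== PORT A =====
-- row["labels"] : KeyError (none) is excluded by Pre_; .getD [] is never taken under Pre_.
def convert_to_3_class (row : List (String × List Int)) : Int :=
  let labels := ((PySem.Dict.mk row).get? "labels").getD []
  if labels.any (fun lab => positiveL.contains lab) then 2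
  else if labels.any (fun lab => negativeL.contains lab) then 0
  else 1

-- ===== PORT B =====
-- the single loop of Source B: return 2 on the first positive label, else carry the saw_negative flag
def convAltLoop (labels : List Int) (sawNeg : Bool) : Int :=
  match labels with
  | [] => if sawNeg then 0 else 1
  | lab :: rest =>
    if positiveL.contains lab then 2
    else convAltLoop rest (sawNeg || negativeL.contains lab)

def convert_to_3_class_alt (row : List (String × List Int)) : Int :=
  convAltLoop (((PySem.Dict.mk row).get? "labels").getD []) false

-- ===== PRECONDITION & SPEC =====
-- A raises KeyError when the row has no "labels" key; exactly those inputs are excluded.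
def Pre_convert_to_3_class (row : List (String × List Int)) : Prop :=
  ((PySem.Dict.mk row).get? "labels").isSome = true
instance (row : List (String × List Int)) : Decidable (Pre_convert_to_3_class row) := by
  unfold Pre_convert_to_3_class; infer_instance

def pvWitness_convert_to_3_class : (List (String × List Int)) := [("labels", [8, 3])]

def Spec_convert_to_3_class (row : List (String × List Int)) (out : Int) : Prop := out = convert_to_3_class_alt row
instance (row : List (String × List Int)) (out : Int) : Decidable (Spec_convert_to_3_class row out) := by unfold Spec_convert_to_3_class; infer_instance

-- ===== CLAIM (what is proved, stated in full; the proofs are below) =====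
def Claim_equal_convert_to_3_class : Prop := ∀ (row : List (String × List Int)), Dom_convert_to_3_class row → Pre_convert_to_3_class row → Spec_convert_to_3_class row (convert_to_3_class row)

-- ===== LEMMAS AND PROOFS =====

-- loop invariant: the flagged single pass equals the two-scan characterisation
theorem convAltLoop_eq (labels : List Int) (sawNeg : Bool) :
    convAltLoop labels sawNeg =
      if labels.any (fun lab => positiveL.contains lab) then 2
      else if sawNeg || labels.any (fun lab => negativeL.contains lab) then 0
      else 1 := by
  induction labels generalizing sawNeg with
  | nil => simp [convAltLoop]
  | cons lab rest ih =>
    by_cases hp : lab ∈ positiveL <;> by_cases hn : lab ∈ negativeL <;>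
      simp [convAltLoop, ih, hp, hn]

-- ===== VERDICT (by name: the statement is the Claim_ definition above) =====
theorem convert_to_3_class_spec : Claim_equal_convert_to_3_class := by
  intro row _ _
  unfold Spec_convert_to_3_class convert_to_3_class convert_to_3_class_alt
  rw [convAltLoop_eq]
  simp
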